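-- pv_equiv track=rewrite | github.com/jameshess9/DailyCodingProblem | DCP158.py | given_solution
-- ===== SOURCE A (Python) =====
-- def given_solution(matrix):
--     # they use a dynamic programming approach to fill in a 2d array for each grid spot
--     m, n = len(matrix), len(matrix[0])
--     num_ways_matrix = [[0 for j in range(n)] for i in range(m)]
--     # so we initially start of with an array of all 0's representing each grid location
--
--     # we can think of this problem as each grid spot can be reached by going from either the top or the left
--     # so all the grid positions on the top can only be reached from the left therefore they all have only 1 way
--     # note if we hit a wall we must break because those spots are no longer reachable
--
--     for j in range(n):
--         if matrix[0][j] == 1: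
--             break
--         num_ways_matrix[0][j] = 1
--
--     # same for first column
--
--     for i in range(m):
--         if matrix[i][0] == 1:
--             break
--         num_ways_matrix[i][0] = 1
--
--
--     # now we loop through the array and add the top and left elems value to current val
--
--     for i in range(1, m):
--         for j in range(1, n):
--             from_top = num_ways_matrix[i - 1][j] if matrix[i - 1][j] != 1 else 0
--             from_left = num_ways_matrix[i][j - 1] if matrix[i][j - 1] != 1 else 0
--
--             num_ways_matrix[i][j] = from_top + from_left
--
--     return num_ways_matrix[-1][-1]
-- ===== SOURCE B (Python) =====
-- def given_solution(matrix):
--     # top-down memoized recursion: value(i, j) = number of ways to reach (i, j)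
--     memo = {}
--
--     def value(i, j):
--         if (i, j) in memo:
--             return memo[(i, j)]
--         if i == 0 and j == 0:
--             r = 1 if matrix[0][0] != 1 else 0
--         elif i == 0:
--             r = 0 if matrix[0][j] == 1 else value(0, j - 1)
--         elif j == 0:
--             r = 0 if matrix[i][0] == 1 else value(i - 1, 0)
--         else:
--             r = (value(i - 1, j) if matrix[i - 1][j] != 1 else 0) \
--                 + (value(i, j - 1) if matrix[i][j - 1] != 1 else 0)
--         memo[(i, j)] = r
--         return r
--
--     return value(len(matrix) - 1, len(matrix[0]) - 1)
-- ===== Notes on version B (the rewrite author's own statement) =====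
-- stated objective: alternative
-- what changed: A builds a full m*n table bottom-up in three staged loops (first-row pass with break, first-column pass with break, then a nested interior sweep); B is a top-down memoized recursion value(i,j) that starts from the target cell and recurses on the path-count recurrence, with the first-row/column breaks replaced by recursive prefix conditions.
-- outside the precondition, e.g. on given_solution([[1], []]): A returns 0, B raises IndexError
import Mathlib
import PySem

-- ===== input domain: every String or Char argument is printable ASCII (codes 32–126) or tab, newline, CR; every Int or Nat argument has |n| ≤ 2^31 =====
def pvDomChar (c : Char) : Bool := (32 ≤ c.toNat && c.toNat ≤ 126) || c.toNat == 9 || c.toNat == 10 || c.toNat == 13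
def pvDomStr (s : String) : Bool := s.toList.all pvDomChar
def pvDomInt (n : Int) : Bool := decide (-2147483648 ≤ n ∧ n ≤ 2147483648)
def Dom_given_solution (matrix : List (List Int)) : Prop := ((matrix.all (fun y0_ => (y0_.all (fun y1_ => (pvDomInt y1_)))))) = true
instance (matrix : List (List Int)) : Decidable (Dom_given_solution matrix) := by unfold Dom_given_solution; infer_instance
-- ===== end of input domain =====

-- B replaces A's bottom-up three-phase table fill by a top-down recursion value(i, j)
-- from the target cell (memoized in Python); same return value, different decomposition.

-- ===== PORT A =====
def pvGetA (mat : List (List Int)) (i j : Nat) : Int := (mat.getD i []).getD j 0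

def pvSetA (mat : List (List Int)) (i j : Nat) (v : Int) : List (List Int) :=
  mat.set i ((mat.getD i []).set j v)

-- `for j in range(n): if matrix[0][j] == 1: break; num[0][j] = 1`
def pvRowLoop (matrix : List (List Int)) : List Nat → List (List Int) → List (List Int)
  | [], num => num
  | j :: js, num =>
      if pvGetA matrix 0 j = 1 then num
      else pvRowLoop matrix js (pvSetA num 0 j 1)

-- `for i in range(m): if matrix[i][0] == 1: break; num[i][0] = 1`
def pvColLoop (matrix : List (List Int)) : List Nat → List (List Int) → List (List Int)
  | [], num => num
  | i :: is, num =>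
      if pvGetA matrix i 0 = 1 then num
      else pvColLoop matrix is (pvSetA num i 0 1)

-- inner `for j in range(1, n)` body of A
def pvInnerA (matrix : List (List Int)) (i : Nat) (num : List (List Int)) (js : List Nat) :
    List (List Int) :=
  js.foldl (fun num j =>
    let fromTop := if pvGetA matrix (i - 1) j ≠ 1 then pvGetA num (i - 1) j else 0
    let fromLeft := if pvGetA matrix i (j - 1) ≠ 1 then pvGetA num i (j - 1) else 0
    pvSetA num i j (fromTop + fromLeft)) num

def given_solution (matrix : List (List Int)) : Int :=
  let m := matrix.length
  let n := (matrix.headD []).length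
  let num0 := (List.range m).map (fun _ => (List.range n).map (fun _ => (0 : Int)))
  let num1 := pvRowLoop matrix (List.range n) num0
  let num2 := pvColLoop matrix (List.range m) num1
  let num3 := (List.range' 1 (m - 1)).foldl
    (fun num i => pvInnerA matrix i num (List.range' 1 (n - 1))) num2
  pvGetA num3 (m - 1) (n - 1)  -- num[-1][-1] with m, n ≥ 1

-- ===== PORT B =====
def pvGetB (matrix : List (List Int)) (i j : Nat) : Int := (matrix.getD i []).getD j 0

-- B's inner `value(i, j)` (the Python memo cache only avoids recomputation; the
-- recursion itself is transcribed as is)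
def pvValueB (matrix : List (List Int)) : Nat → Nat → Int
  | 0, 0 => if pvGetB matrix 0 0 ≠ 1 then 1 else 0
  | 0, j + 1 => if pvGetB matrix 0 (j + 1) = 1 then 0 else pvValueB matrix 0 j
  | i + 1, 0 => if pvGetB matrix (i + 1) 0 = 1 then 0 else pvValueB matrix i 0
  | i + 1, j + 1 =>
      (if pvGetB matrix i (j + 1) ≠ 1 then pvValueB matrix i (j + 1) else 0) +
      (if pvGetB matrix (i + 1) j ≠ 1 then pvValueB matrix (i + 1) j else 0)

def given_solution_alt (matrix : List (List Int)) : Int :=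
  pvValueB matrix (matrix.length - 1) ((matrix.headD []).length - 1)

-- ===== PRECONDITION & SPEC =====
-- Pre_ excludes inputs where Python A raises IndexError: the empty matrix, an empty first
-- row, ragged matrices with a non-last row shorter than the first row, and a last row
-- shorter than len(matrix[0]) - 1 (or empty when len(matrix[0]) = 1).  On a few such
-- ragged matrices A happens to return anyway because a `break` short-circuits the
-- offending access (e.g. [[1], []], where A returns 0 but B's recursion raises);
-- those stay excluded although A returns there.
def Pre_given_solution (matrix : List (List Int)) : Prop :=
  matrix ≠ [] ∧ 0 < (matrix.headD []).length ∧
    (∀ i < matrix.length - 1,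
      (matrix.headD []).length ≤ (matrix.getD i []).length) ∧
    max ((matrix.headD []).length - 1) 1 ≤ (matrix.getD (matrix.length - 1) []).length

instance (matrix : List (List Int)) : Decidable (Pre_given_solution matrix) := by
  unfold Pre_given_solution; infer_instance

def pvWitness_given_solution : List (List Int) := [[0, 0], [0, 0]]

def Spec_given_solution (matrix : List (List Int)) (out : Int) : Prop :=
  out = given_solution_alt matrix
instance (matrix : List (List Int)) (out : Int) : Decidable (Spec_given_solution matrix out) := by
  unfold Spec_given_solution; infer_instance

-- ===== CLAIM (what is proved, stated in full; the proofs are below) =====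
def Claim_equal_given_solution : Prop :=
  ∀ (matrix : List (List Int)), Dom_given_solution matrix → Pre_given_solution matrix →
    Spec_given_solution matrix (given_solution matrix)

-- ===== LEMMAS AND PROOFS =====

-- The mathematical path-count both programs compute (proof-side bridge).
def pvW (matrix : List (List Int)) : Nat → Nat → Int
  | 0, 0 => if pvGetA matrix 0 0 = 1 then 0 else 1
  | 0, j + 1 => if pvGetA matrix 0 (j + 1) = 1 then 0 else pvW matrix 0 j
  | i + 1, 0 => if pvGetA matrix (i + 1) 0 = 1 then 0 else pvW matrix i 0
  | i + 1, j + 1 =>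
      (if pvGetA matrix i (j + 1) = 1 then 0 else pvW matrix i (j + 1)) +
      (if pvGetA matrix (i + 1) j = 1 then 0 else pvW matrix (i + 1) j)

theorem pvForall_le_succ (p : Nat → Prop) (n : Nat) :
    (∀ x ≤ n + 1, p x) ↔ (∀ x ≤ n, p x) ∧ p (n + 1) := by
  constructor
  · exact fun h => ⟨fun x hx => h x (by omega), h _ le_rfl⟩
  · rintro ⟨h1, h2⟩ x hx
    rcases Nat.lt_or_ge x (n + 1) with h | h
    · exact h1 x (by omega)
    · have hx' : x = n + 1 := by omega
      subst hx'; exact h2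

theorem pvW_row (matrix : List (List Int)) (c : Nat) :
    pvW matrix 0 c = if ∀ k ≤ c, pvGetA matrix 0 k ≠ 1 then 1 else 0 := by
  induction c with
  | zero => by_cases h : pvGetA matrix 0 0 = 1 <;> simp [pvW, h]
  | succ c ih =>
    have hstep : pvW matrix 0 (c + 1) =
        if pvGetA matrix 0 (c + 1) = 1 then 0 else pvW matrix 0 c := by rw [pvW]
    rw [hstep, ih]
    simp only [pvForall_le_succ]
    by_cases h : pvGetA matrix 0 (c + 1) = 1
    · rw [if_pos h, if_neg (by tauto)]
    · by_cases hall : ∀ k ≤ c, pvGetA matrix 0 k ≠ 1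
      · rw [if_neg h, if_pos hall, if_pos ⟨hall, h⟩]
      · rw [if_neg h, if_neg hall, if_neg (by tauto)]

theorem pvW_col (matrix : List (List Int)) (r : Nat) :
    pvW matrix r 0 = if ∀ k ≤ r, pvGetA matrix k 0 ≠ 1 then 1 else 0 := by
  induction r with
  | zero => by_cases h : pvGetA matrix 0 0 = 1 <;> simp [pvW, h]
  | succ r ih =>
    have hstep : pvW matrix (r + 1) 0 =
        if pvGetA matrix (r + 1) 0 = 1 then 0 else pvW matrix r 0 := by rw [pvW]
    rw [hstep, ih]
    simp only [pvForall_le_succ]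
    by_cases h : pvGetA matrix (r + 1) 0 = 1
    · rw [if_pos h, if_neg (by tauto)]
    · by_cases hall : ∀ k ≤ r, pvGetA matrix k 0 ≠ 1
      · rw [if_neg h, if_pos hall, if_pos ⟨hall, h⟩]
      · rw [if_neg h, if_neg hall, if_neg (by tauto)]

def pvShape (num : List (List Int)) (m n : Nat) : Prop :=
  num.length = m ∧ ∀ row ∈ num, row.length = n

theorem pvShape_set (num : List (List Int)) (m n i j : Nat) (v : Int)
    (h : pvShape num m n) (hi : i < m) : pvShape (pvSetA num i j v) m n := by
  obtain ⟨h1, h2⟩ := h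
  refine ⟨by simp [pvSetA, h1], ?_⟩
  intro row hrow
  unfold pvSetA at hrow
  rcases List.mem_or_eq_of_mem_set hrow with hmem | heq
  · exact h2 _ hmem
  · subst heq
    have hlen : i < num.length := by omega
    rw [List.getD_eq_getElem?_getD, List.getElem?_eq_getElem hlen]
    simp [h2 _ (List.getElem_mem hlen)]

theorem pvGetA_set (num : List (List Int)) (m n i j : Nat) (v : Int) (i' j' : Nat)
    (h : pvShape num m n) (hi : i < m) (hj : j < n) :
    pvGetA (pvSetA num i j v) i' j' = if i' = i ∧ j' = j then v else pvGetA num i' j' := by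
  obtain ⟨h1, h2⟩ := h
  have hlen : i < num.length := by omega
  have hrl : j < (num[i]).length := by
    rw [h2 _ (List.getElem_mem hlen)]; omega
  unfold pvGetA pvSetA
  simp only [List.getD_eq_getElem?_getD]
  by_cases hii : i' = i
  · subst hii
    rw [List.getElem?_set_self hlen, List.getElem?_eq_getElem hlen]
    simp only [Option.getD_some]
    by_cases hjj : j' = j
    · subst hjj
      rw [List.getElem?_set_self hrl]
      simp
    · rw [List.getElem?_set_ne (by omega), if_neg (by tauto)]
  · rw [List.getElem?_set_ne (by omega), if_neg (by tauto)]

theorem pvZero_get (m n r c : Nat) :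
    pvGetA ((List.range m).map (fun _ => (List.range n).map (fun _ => (0 : Int)))) r c = 0 := by
  unfold pvGetA
  simp only [List.getD_eq_getElem?_getD, List.map_const', List.length_range,
    List.getElem?_replicate]
  split_ifs <;> simp

theorem pvZero_shape (m n : Nat) :
    pvShape ((List.range m).map (fun _ => (List.range n).map (fun _ => (0 : Int)))) m n := by
  constructor
  · simp
  · intro row hrow
    simp only [List.mem_map] at hrow
    obtain ⟨_, _, hh⟩ := hrow
    simp [← hh]

theorem pvRowLoop_shape (matrix : List (List Int)) (m n : Nat) (hm : 0 < m) :
    ∀ (cnt j0 : Nat) (num : List (List Int)), pvShape num m n →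
      pvShape (pvRowLoop matrix (List.range' j0 cnt) num) m n := by
  intro cnt
  induction cnt with
  | zero => intro j0 num h; simpa [pvRowLoop] using h
  | succ cnt ih =>
    intro j0 num h
    rw [List.range'_succ]
    by_cases hbr : pvGetA matrix 0 j0 = 1
    · simpa [pvRowLoop, hbr] using h
    · simpa [pvRowLoop, hbr] using
        ih (j0 + 1) (pvSetA num 0 j0 1) (pvShape_set num m n 0 j0 1 h hm)

theorem pvRowLoop_get (matrix : List (List Int)) (m n : Nat) (hm : 0 < m) :
    ∀ (cnt j0 : Nat) (num : List (List Int)), pvShape num m n → j0 + cnt ≤ n →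
      (∀ k < j0, pvGetA matrix 0 k ≠ 1) →
      ∀ r, r < m → ∀ c, c < n →
        pvGetA (pvRowLoop matrix (List.range' j0 cnt) num) r c =
          if r = 0 ∧ j0 ≤ c ∧ c < j0 + cnt ∧ (∀ k ≤ c, pvGetA matrix 0 k ≠ 1) then 1
          else pvGetA num r c := by
  intro cnt
  induction cnt with
  | zero =>
    intro j0 num hsh hle hpre r hr c hc
    simp only [List.range'_zero, pvRowLoop]
    rw [if_neg (by rintro ⟨_, h1, h2, _⟩; omega)]
  | succ cnt ih =>
    intro j0 num hsh hle hpre r hr c hc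
    rw [List.range'_succ]
    by_cases hbr : pvGetA matrix 0 j0 = 1
    · simp only [pvRowLoop, if_pos hbr]
      rw [if_neg (by rintro ⟨_, h1, _, h3⟩; exact h3 j0 h1 hbr)]
    · simp only [pvRowLoop, if_neg hbr]
      have hpre' : ∀ k < j0 + 1, pvGetA matrix 0 k ≠ 1 := by
        intro k hk
        rcases Nat.lt_or_ge k j0 with h | h
        · exact hpre k h
        · have hk' : k = j0 := by omega
          subst hk'; exact hbr
      have hsh' := pvShape_set num m n 0 j0 1 hsh hm
      rw [ih (j0 + 1) _ hsh' (by omega) hpre' r hr c hc,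
          pvGetA_set num m n 0 j0 1 r c hsh hm (by omega)]
      by_cases hr0 : r = 0
      · subst hr0
        by_cases hcj : c = j0
        · subst hcj
          rw [if_neg (by omega), if_pos ⟨rfl, rfl⟩,
              if_pos ⟨rfl, le_rfl, by omega, fun k hk => hpre' k (by omega)⟩]
        · by_cases hcond : j0 + 1 ≤ c ∧ c < j0 + 1 + cnt ∧ (∀ k ≤ c, pvGetA matrix 0 k ≠ 1)
          · rw [if_pos ⟨rfl, hcond⟩,
              if_pos ⟨rfl, by omega, by omega, hcond.2.2⟩]
          · rw [if_neg (by tauto), if_neg (by simp [hcj]),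
              if_neg (by rintro ⟨_, h1, h2, h3⟩; exact hcond ⟨by omega, by omega, h3⟩)]
      · rw [if_neg (by tauto), if_neg (by tauto), if_neg (by tauto)]

theorem pvColLoop_shape (matrix : List (List Int)) (m n : Nat) :
    ∀ (cnt i0 : Nat) (num : List (List Int)), pvShape num m n → i0 + cnt ≤ m →
      pvShape (pvColLoop matrix (List.range' i0 cnt) num) m n := by
  intro cnt
  induction cnt with
  | zero => intro i0 num h _; simpa [pvColLoop] using h
  | succ cnt ih =>
    intro i0 num h hle
    rw [List.range'_succ]
    by_cases hbr : pvGetA matrix i0 0 = 1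
    · simpa [pvColLoop, hbr] using h
    · simpa [pvColLoop, hbr] using
        ih (i0 + 1) (pvSetA num i0 0 1) (pvShape_set num m n i0 0 1 h (by omega)) (by omega)

theorem pvColLoop_get (matrix : List (List Int)) (m n : Nat) (hn : 0 < n) :
    ∀ (cnt i0 : Nat) (num : List (List Int)), pvShape num m n → i0 + cnt ≤ m →
      (∀ k < i0, pvGetA matrix k 0 ≠ 1) →
      ∀ r, r < m → ∀ c, c < n →
        pvGetA (pvColLoop matrix (List.range' i0 cnt) num) r c =
          if c = 0 ∧ i0 ≤ r ∧ r < i0 + cnt ∧ (∀ k ≤ r, pvGetA matrix k 0 ≠ 1) then 1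
          else pvGetA num r c := by
  intro cnt
  induction cnt with
  | zero =>
    intro i0 num hsh hle hpre r hr c hc
    simp only [List.range'_zero, pvColLoop]
    rw [if_neg (by rintro ⟨_, h1, h2, _⟩; omega)]
  | succ cnt ih =>
    intro i0 num hsh hle hpre r hr c hc
    rw [List.range'_succ]
    by_cases hbr : pvGetA matrix i0 0 = 1
    · simp only [pvColLoop, if_pos hbr]
      rw [if_neg (by rintro ⟨_, h1, _, h3⟩; exact h3 i0 h1 hbr)]
    · simp only [pvColLoop, if_neg hbr]
      have hpre' : ∀ k < i0 + 1, pvGetA matrix k 0 ≠ 1 := by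
        intro k hk
        rcases Nat.lt_or_ge k i0 with h | h
        · exact hpre k h
        · have hk' : k = i0 := by omega
          subst hk'; exact hbr
      have hsh' := pvShape_set num m n i0 0 1 hsh (by omega)
      rw [ih (i0 + 1) _ hsh' (by omega) hpre' r hr c hc,
          pvGetA_set num m n i0 0 1 r c hsh (by omega) hn]
      by_cases hc0 : c = 0
      · subst hc0
        by_cases hri : r = i0
        · subst hri
          rw [if_neg (by omega), if_pos ⟨rfl, rfl⟩,
              if_pos ⟨rfl, le_rfl, by omega, fun k hk => hpre' k (by omega)⟩]
        · by_cases hcond : i0 + 1 ≤ r ∧ r < i0 + 1 + cnt ∧ (∀ k ≤ r, pvGetA matrix k 0 ≠ 1)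
          · rw [if_pos ⟨rfl, hcond⟩,
              if_pos ⟨rfl, by omega, by omega, hcond.2.2⟩]
          · rw [if_neg (by tauto), if_neg (by simp [hri]),
              if_neg (by rintro ⟨_, h1, h2, h3⟩; exact hcond ⟨by omega, by omega, h3⟩)]
      · rw [if_neg (by tauto), if_neg (by tauto), if_neg (by tauto)]

theorem pvInnerA_shape (matrix : List (List Int)) (m n i : Nat) (him : i < m) :
    ∀ (cnt j0 : Nat) (num : List (List Int)), pvShape num m n → j0 + cnt ≤ n →
      pvShape (pvInnerA matrix i num (List.range' j0 cnt)) m n := by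
  intro cnt
  induction cnt with
  | zero => intro j0 num h _; simpa [pvInnerA] using h
  | succ cnt ih =>
    intro j0 num h hle
    rw [List.range'_succ]
    exact ih (j0 + 1) (pvSetA num i j0 _) (pvShape_set num m n i j0 _ h him) (by omega)

theorem pvInnerA_get (matrix : List (List Int)) (m n i : Nat) (hi1 : 1 ≤ i) (him : i < m) :
    ∀ (cnt j0 : Nat) (num : List (List Int)), pvShape num m n → 1 ≤ j0 → j0 + cnt ≤ n →
      (∀ r, r < m → ∀ c, c < n →
        pvGetA num r c = if r < i ∨ c = 0 ∨ (r = i ∧ c < j0) then pvW matrix r c else 0) →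
      ∀ r, r < m → ∀ c, c < n →
        pvGetA (pvInnerA matrix i num (List.range' j0 cnt)) r c =
          if r < i ∨ c = 0 ∨ (r = i ∧ c < j0 + cnt) then pvW matrix r c else 0 := by
  intro cnt
  induction cnt with
  | zero =>
    intro j0 num hsh hj0 hle hInv r hr c hc
    simp only [List.range'_zero]
    rw [show pvInnerA matrix i num [] = num from rfl, hInv r hr c hc]
    exact if_congr (by omega) rfl rfl
  | succ cnt ih =>
    intro j0 num hsh hj0 hle hInv r hr c hc
    obtain ⟨a, rfl⟩ : ∃ a, i = a + 1 := ⟨i - 1, by omega⟩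
    obtain ⟨b, rfl⟩ : ∃ b, j0 = b + 1 := ⟨j0 - 1, by omega⟩
    have hv : ((if pvGetA matrix (a + 1 - 1) (b + 1) ≠ 1 then pvGetA num (a + 1 - 1) (b + 1) else 0) +
        (if pvGetA matrix (a + 1) (b + 1 - 1) ≠ 1 then pvGetA num (a + 1) (b + 1 - 1) else 0))
        = pvW matrix (a + 1) (b + 1) := by
      simp only [Nat.add_sub_cancel]
      have hgt : pvGetA num a (b + 1) = pvW matrix a (b + 1) := by
        rw [hInv a (by omega) (b + 1) (by omega), if_pos (Or.inl (by omega))]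
      have hgl : pvGetA num (a + 1) b = pvW matrix (a + 1) b := by
        rw [hInv (a + 1) (by omega) b (by omega), if_pos (Or.inr (Or.inr ⟨rfl, by omega⟩))]
      rw [hgt, hgl, pvW]
      by_cases h1 : pvGetA matrix a (b + 1) = 1 <;>
        by_cases h2 : pvGetA matrix (a + 1) b = 1 <;> simp [h1, h2]
    have hunf : pvInnerA matrix (a + 1) num (List.range' (b + 1) (cnt + 1)) =
        pvInnerA matrix (a + 1) (pvSetA num (a + 1) (b + 1)
          ((if pvGetA matrix (a + 1 - 1) (b + 1) ≠ 1 then pvGetA num (a + 1 - 1) (b + 1) else 0) +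
           (if pvGetA matrix (a + 1) (b + 1 - 1) ≠ 1 then pvGetA num (a + 1) (b + 1 - 1) else 0)))
          (List.range' (b + 1 + 1) cnt) := by
      rw [List.range'_succ]; rfl
    rw [hunf, hv]
    have hsh' := pvShape_set num m n (a + 1) (b + 1) (pvW matrix (a + 1) (b + 1)) hsh (by omega)
    have hInv' : ∀ r, r < m → ∀ c, c < n →
        pvGetA (pvSetA num (a + 1) (b + 1) (pvW matrix (a + 1) (b + 1))) r c =
          if r < a + 1 ∨ c = 0 ∨ (r = a + 1 ∧ c < b + 1 + 1) then pvW matrix r c else 0 := by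
      intro r hr c hc
      rw [pvGetA_set num m n (a + 1) (b + 1) _ r c hsh (by omega) (by omega)]
      by_cases h : r = a + 1 ∧ c = b + 1
      · rw [if_pos h, if_pos (Or.inr (Or.inr ⟨h.1, by omega⟩)), h.1, h.2]
      · rw [if_neg h, hInv r hr c hc]
        exact if_congr (by omega) rfl rfl
    rw [ih (b + 1 + 1) _ hsh' (by omega) (by omega) hInv' r hr c hc]
    exact if_congr (by omega) rfl rfl

theorem pvOuterA (matrix : List (List Int)) (m n : Nat) (hn : 0 < n) :
    ∀ (cnt i0 : Nat) (num : List (List Int)), pvShape num m n → 1 ≤ i0 → i0 + cnt ≤ m →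
      (∀ r, r < m → ∀ c, c < n →
        pvGetA num r c = if r ≤ i0 - 1 ∨ c = 0 then pvW matrix r c else 0) →
      ∀ r, r < m → ∀ c, c < n →
        pvGetA ((List.range' i0 cnt).foldl
            (fun num i => pvInnerA matrix i num (List.range' 1 (n - 1))) num) r c =
          if r ≤ i0 - 1 + cnt ∨ c = 0 then pvW matrix r c else 0 := by
  intro cnt
  induction cnt with
  | zero =>
    intro i0 num hsh h1 hle hInv r hr c hc
    simp only [List.range'_zero, List.foldl_nil]
    rw [hInv r hr c hc]
    exact if_congr (by omega) rfl rfl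
  | succ cnt ih =>
    intro i0 num hsh h1 hle hInv r hr c hc
    rw [List.range'_succ]
    simp only [List.foldl_cons]
    have hsh' := pvInnerA_shape matrix m n i0 (by omega) (n - 1) 1 num hsh (by omega)
    have hInv0 : ∀ r, r < m → ∀ c, c < n →
        pvGetA num r c = if r < i0 ∨ c = 0 ∨ (r = i0 ∧ c < 1) then pvW matrix r c else 0 := by
      intro r hr c hc; rw [hInv r hr c hc]; exact if_congr (by omega) rfl rfl
    have hInner := pvInnerA_get matrix m n i0 h1 (by omega) (n - 1) 1 num hsh le_rfl (by omega) hInv0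
    have hInv' : ∀ r, r < m → ∀ c, c < n →
        pvGetA (pvInnerA matrix i0 num (List.range' 1 (n - 1))) r c =
          if r ≤ i0 + 1 - 1 ∨ c = 0 then pvW matrix r c else 0 := by
      intro r hr c hc; rw [hInner r hr c hc]; exact if_congr (by omega) rfl rfl
    rw [ih (i0 + 1) _ hsh' (by omega) (by omega) hInv' r hr c hc]
    exact if_congr (by omega) rfl rfl

theorem given_solution_eq_pvW (matrix : List (List Int))
    (hm : matrix ≠ []) (hn : matrix.headD [] ≠ []) :
    given_solution matrix = pvW matrix (matrix.length - 1) ((matrix.headD []).length - 1) := by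
  have hm1 : 0 < matrix.length := List.length_pos_iff.mpr hm
  have hn1 : 0 < (matrix.headD []).length := List.length_pos_iff.mpr hn
  set m := matrix.length with hmdef
  set n := (matrix.headD []).length with hndef
  have hrfl : given_solution matrix = pvGetA ((List.range' 1 (m - 1)).foldl
      (fun num i => pvInnerA matrix i num (List.range' 1 (n - 1)))
      (pvColLoop matrix (List.range m) (pvRowLoop matrix (List.range n)
        ((List.range m).map (fun _ => (List.range n).map (fun _ => (0 : Int)))))))
      (m - 1) (n - 1) := rfl
  rw [hrfl]
  set num0 := (List.range m).map (fun _ => (List.range n).map (fun _ => (0 : Int))) with h0def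
  have hsh0 := pvZero_shape m n
  have hsh1 : pvShape (pvRowLoop matrix (List.range n) num0) m n := by
    rw [List.range_eq_range']
    exact pvRowLoop_shape matrix m n hm1 n 0 num0 hsh0
  have h1get : ∀ r, r < m → ∀ c, c < n →
      pvGetA (pvRowLoop matrix (List.range n) num0) r c =
        if r = 0 ∧ (∀ k ≤ c, pvGetA matrix 0 k ≠ 1) then 1 else 0 := by
    intro r hr c hc
    rw [List.range_eq_range',
      pvRowLoop_get matrix m n hm1 n 0 num0 hsh0 (by omega) (fun k hk => absurd hk (by omega)) r hr c hc,
      pvZero_get]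
    exact if_congr ⟨fun h => ⟨h.1, h.2.2.2⟩, fun h => ⟨h.1, by omega, by omega, h.2⟩⟩ rfl rfl
  set num1 := pvRowLoop matrix (List.range n) num0 with h1def
  have hsh2 : pvShape (pvColLoop matrix (List.range m) num1) m n := by
    rw [List.range_eq_range']
    exact pvColLoop_shape matrix m n m 0 num1 hsh1 (by omega)
  have h2get : ∀ r, r < m → ∀ c, c < n →
      pvGetA (pvColLoop matrix (List.range m) num1) r c =
        if c = 0 ∧ (∀ k ≤ r, pvGetA matrix k 0 ≠ 1) then 1 else pvGetA num1 r c := by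
    intro r hr c hc
    rw [List.range_eq_range',
      pvColLoop_get matrix m n hn1 m 0 num1 hsh1 (by omega) (fun k hk => absurd hk (by omega)) r hr c hc]
    exact if_congr ⟨fun h => ⟨h.1, h.2.2.2⟩, fun h => ⟨h.1, by omega, by omega, h.2⟩⟩ rfl rfl
  set num2 := pvColLoop matrix (List.range m) num1 with h2def
  have hEdge : ∀ r, r < m → ∀ c, c < n →
      pvGetA num2 r c = if r ≤ 1 - 1 ∨ c = 0 then pvW matrix r c else 0 := by
    intro r hr c hc
    rw [h2get r hr c hc, h1get r hr c hc]
    by_cases hr0 : r = 0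
    · subst hr0
      by_cases hc0 : c = 0
      · subst hc0
        rw [if_pos (Or.inl (by omega)), pvW_row]
        by_cases hg : pvGetA matrix 0 0 = 1
        · rw [if_neg (by rintro ⟨_, h⟩; exact h 0 le_rfl hg),
            if_neg (by rintro ⟨_, h⟩; exact h 0 le_rfl hg),
            if_neg (by intro h; exact h 0 le_rfl hg)]
        · have hall0 : ∀ k ≤ 0, pvGetA matrix 0 k ≠ 1 := by
            intro k hk; have hk0 : k = 0 := by omega
            subst hk0; exact hg
          have hallc : ∀ k ≤ 0, pvGetA matrix k 0 ≠ 1 := by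
            intro k hk; have hk0 : k = 0 := by omega
            subst hk0; exact hg
          rw [if_pos ⟨rfl, hallc⟩, if_pos hall0]
      · rw [if_neg (fun h => hc0 h.1), if_pos (Or.inl (by omega)), pvW_row]
        exact if_congr ⟨fun h => h.2, fun h => ⟨rfl, h⟩⟩ rfl rfl
    · by_cases hc0 : c = 0
      · subst hc0
        rw [if_pos (Or.inr rfl), pvW_col]
        by_cases hall : ∀ k ≤ r, pvGetA matrix k 0 ≠ 1
        · rw [if_pos ⟨rfl, hall⟩, if_pos hall]
        · rw [if_neg (fun h => hall h.2), if_neg (fun h => hr0 h.1), if_neg hall]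
      · rw [if_neg (fun h => hc0 h.1), if_neg (fun h => hr0 h.1), if_neg (by omega)]
  rw [pvOuterA matrix m n hn1 (m - 1) 1 num2 hsh2 le_rfl (by omega) hEdge
      (m - 1) (by omega) (n - 1) (by omega),
    if_pos (Or.inl (by omega))]

-- ===== B side: the recursion value(i, j) computes the same bridge function =====
theorem pvValueB_eq_pvW (matrix : List (List Int)) (i j : Nat) :
    pvValueB matrix i j = pvW matrix i j := by
  fun_induction pvValueB matrix i j <;>
    simp_all [pvW, pvGetB, pvGetA]

theorem given_solution_alt_eq_pvW (matrix : List (List Int)) :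
    given_solution_alt matrix = pvW matrix (matrix.length - 1) ((matrix.headD []).length - 1) := by
  unfold given_solution_alt
  exact pvValueB_eq_pvW matrix _ _

-- ===== VERDICT (by name: the statement is the Claim_ definition above) =====
theorem given_solution_spec : Claim_equal_given_solution := by
  intro matrix _ hpre
  unfold Spec_given_solution
  have hn : matrix.headD [] ≠ [] := List.length_pos_iff.mp hpre.2.1
  rw [given_solution_eq_pvW matrix hpre.1 hn, given_solution_alt_eq_pvW matrix]
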